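-- pv_equiv track=rewrite | github.com/YJL33/LeetCode | current_session/python/2135.py | wordCount
-- ===== SOURCE A (Python) =====
-- from typing import List
-- import collections
--
-- def wordCount(startWords: List[str], targetWords: List[str]) -> int:
--     wd = collections.defaultdict(set)
--     def to_sig(word):
--         tmp = [c for c in word]
--         tmp.sort()
--         return ''.join(tmp)
--
--     for w in startWords:
--         wd[len(w)].add(to_sig(w))
--
--     cnt = 0
--     for t in targetWords:
--         l = len(t)-1
--         for i in range(len(t)):
--             tmp = t[:i]+t[i+1:]
--             if to_sig(tmp) in wd[l]:
--                 cnt += 1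
--                 break
--     return cnt
-- ===== SOURCE B (Python) =====
-- def wordCount(startWords, targetWords):
--     # Forward construction: instead of deleting each letter of each target and
--     # re-checking, precompute every signature reachable by APPENDING one letter
--     # of the targets' alphabet to a start word; then one set lookup per target.
--     # Correct because sig(t) == sig(s + c) forces c to occur in t, and removing
--     # that occurrence of c from t leaves a permutation of s.
--     alphabet = {c for t in targetWords for c in t}
--     reachable = {''.join(sorted(s + c)) for s in startWords for c in alphabet}
--     return sum(''.join(sorted(t)) in reachable for t in targetWords)
-- ===== Notes on version B (the rewrite author's own statement) =====
-- stated objective: alternative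
-- what changed: Replaces A's per-target deletion loop (slice out each position, re-sort, look up in a length-keyed dict of signature sets, break on first hit) by a forward construction: precompute the set of signatures obtainable by appending one target-alphabet letter to a start word, then a single sorted-signature set lookup per target.
import Mathlib
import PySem

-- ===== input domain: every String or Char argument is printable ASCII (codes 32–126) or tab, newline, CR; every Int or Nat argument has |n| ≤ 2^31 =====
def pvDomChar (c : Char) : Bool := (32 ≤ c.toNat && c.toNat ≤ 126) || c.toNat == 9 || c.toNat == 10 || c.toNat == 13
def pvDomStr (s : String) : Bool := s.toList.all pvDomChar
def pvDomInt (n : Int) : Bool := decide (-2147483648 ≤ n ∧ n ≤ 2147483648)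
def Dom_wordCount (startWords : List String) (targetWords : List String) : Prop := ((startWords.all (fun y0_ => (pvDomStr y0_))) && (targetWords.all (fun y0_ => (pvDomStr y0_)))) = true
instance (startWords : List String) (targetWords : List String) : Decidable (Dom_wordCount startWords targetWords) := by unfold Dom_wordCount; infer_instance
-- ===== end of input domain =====

-- B replaces A's per-target deletion loop (slice out each position, re-sort, look up in a
-- length-keyed dict of signature sets, break on first hit) by a forward construction: the
-- set of signatures reachable by appending one target-alphabet letter to a start word is
-- built once, and each target is a single set lookup; return values are proved equal.

-- ===== PORT A =====
-- to_sig(word): sort the characters and join them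
def pvToSig (word : String) : String :=
  String.ofList (PySem.List.sorted word.toList (fun c => c) false)

-- the defaultdict(set) build loop: wd[len(w)].add(to_sig(w))
def pvBuildWd (startWords : List String) : PySem.Dict Int (PySem.Set String) :=
  startWords.foldl
    (fun d w => d.modify (PySem.Str.len w) PySem.Set.empty (fun s => PySem.Set.add s (pvToSig w)))
    PySem.Dict.empty

-- inner 'for i in range(len(t)): … break' loop: 1 on the first hit, else 0
def pvAInner (wd : PySem.Dict Int (PySem.Set String)) (t : String) (l : Int) : List Int → Int
  | [] => 0
  | i :: rest =>
    let tmp := PySem.Str.slice t none (some i) ++ PySem.Str.slice t (some (i + 1)) none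
    if PySem.Set.contains (wd.getD l PySem.Set.empty) (pvToSig tmp) then 1
    else pvAInner wd t l rest

def wordCount (startWords : List String) (targetWords : List String) : Int :=
  targetWords.foldl
    (fun cnt t => cnt + pvAInner (pvBuildWd startWords) t (PySem.Str.len t - 1)
        (PySem.List.pyRange 0 (PySem.Str.len t) 1))
    0

-- ===== PORT B =====
-- ''.join(sorted(xs)) over a character list
def pvSig (xs : List Char) : List Char :=
  PySem.List.sorted xs (fun c => c) false

-- alphabet = {c for t in targetWords for c in t}
def pvAlphabet (targetWords : List String) : PySem.Set Char :=
  PySem.Set.ofList (targetWords.flatMap (fun t => t.toList))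

-- reachable = {''.join(sorted(s+c)) for s in startWords for c in alphabet}
def pvReachable (startWords : List String) (alphabet : PySem.Set Char) : PySem.Set String :=
  PySem.Set.ofList (startWords.flatMap
    (fun s => alphabet.map (fun c => String.ofList (pvSig (s.toList ++ [c])))))

-- sum(''.join(sorted(t)) in reachable for t in targetWords)
def wordCount_alt (startWords : List String) (targetWords : List String) : Int :=
  let reachable := pvReachable startWords (pvAlphabet targetWords)
  targetWords.foldl
    (fun cnt t =>
      cnt + (if PySem.Set.contains reachable (String.ofList (pvSig t.toList)) then 1 else 0))
    0

-- ===== PRECONDITION & SPEC =====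
def Spec_wordCount (startWords : List String) (targetWords : List String) (out : Int) : Prop := out = wordCount_alt startWords targetWords
instance (startWords : List String) (targetWords : List String) (out : Int) : Decidable (Spec_wordCount startWords targetWords out) := by unfold Spec_wordCount; infer_instance

-- ===== CLAIM (what is proved, stated in full; the proofs are below) =====
def Claim_equal_wordCount : Prop := ∀ (startWords : List String) (targetWords : List String), Dom_wordCount startWords targetWords → Spec_wordCount startWords targetWords (wordCount startWords targetWords)

-- ===== LEMMAS AND PROOFS =====

-- sorting char lists with the identity key is Pairwise (· ≤ ·)
lemma pvSorted_pairwise (xs : List Char) :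
    (PySem.List.sorted xs (fun c => c) false).Pairwise (· ≤ ·) :=
  PySem.List.sorted_pairwise xs (fun c => c)

-- two ≤-sorted permutations of each other are equal
lemma pvSorted_eq_of_perm {xs ys : List Char} (h : xs.Perm ys)
    (hx : xs.Pairwise (· ≤ ·)) (hy : ys.Pairwise (· ≤ ·)) : xs = ys :=
  h.eq_of_pairwise (fun _ _ _ _ hab hba => le_antisymm hab hba) hx hy

-- KEY FACT: permuted lists have the same signature
lemma pvSig_eq_of_perm {xs ys : List Char} (h : xs.Perm ys) : pvSig xs = pvSig ys :=
  pvSorted_eq_of_perm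
    ((PySem.List.sorted_perm xs _ false).trans (h.trans (PySem.List.sorted_perm ys _ false).symm))
    (pvSorted_pairwise xs) (pvSorted_pairwise ys)

-- a list is a permutation of any element consed onto its deletion
lemma pvPerm_cons_eraseIdx (tl : List Char) (k : Nat) (hk : k < tl.length) :
    tl.Perm (tl[k] :: tl.eraseIdx k) := by
  conv_lhs => rw [← List.take_append_drop k tl]
  rw [List.drop_eq_getElem_cons hk, List.eraseIdx_eq_take_drop_succ]
  exact List.perm_middle

-- membership in A's length-keyed signature dict, fold form
lemma pvMem_buildWd_foldl (S : List String) (d : PySem.Dict Int (PySem.Set String)) (l : Int) (x : String) :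
    x ∈ (S.foldl
      (fun d w => d.modify (PySem.Str.len w) PySem.Set.empty (fun s => PySem.Set.add s (pvToSig w))) d).getD l PySem.Set.empty
    ↔ x ∈ d.getD l PySem.Set.empty ∨ ∃ w ∈ S, PySem.Str.len w = l ∧ pvToSig w = x := by
  induction S generalizing d with
  | nil => simp
  | cons w rest ih =>
    rw [List.foldl_cons, ih, PySem.Dict.getD_modify]
    by_cases h : l = PySem.Str.len w
    · subst h
      rw [if_pos rfl]
      rw [PySem.Set.mem_add]
      constructor
      · rintro (⟨h1 | h2⟩ | ⟨w', hw, hl, hsig⟩)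
        · exact Or.inl h1
        · exact Or.inr ⟨w, List.mem_cons_self, rfl, h2.symm⟩
        · exact Or.inr ⟨w', List.mem_cons_of_mem _ hw, hl, hsig⟩
      · rintro (h1 | ⟨w', hw', hl, hsig⟩)
        · exact Or.inl (Or.inl h1)
        · rcases List.mem_cons.mp hw' with rfl | hw
          · exact Or.inl (Or.inr hsig.symm)
          · exact Or.inr ⟨w', hw, hl, hsig⟩
    · rw [if_neg h]
      constructor
      · rintro (h1 | ⟨w', hw, hl, hsig⟩)
        · exact Or.inl h1
        · exact Or.inr ⟨w', List.mem_cons_of_mem _ hw, hl, hsig⟩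
      · rintro (h1 | ⟨w', hw', hl, hsig⟩)
        · exact Or.inl h1
        · rcases List.mem_cons.mp hw' with rfl | hw
          · exact absurd hl.symm h
          · exact Or.inr ⟨w', hw, hl, hsig⟩

lemma pvMem_buildWd (S : List String) (l : Int) (x : String) :
    x ∈ (pvBuildWd S).getD l PySem.Set.empty ↔ ∃ w ∈ S, PySem.Str.len w = l ∧ pvToSig w = x := by
  unfold pvBuildWd
  rw [pvMem_buildWd_foldl]
  simp [PySem.Set.empty]

-- a 'break on first hit' loop returning 1/0 is a Boolean any
lemma pvIf_bool (a b : Bool) : (if a then (1 : Int) else if b then 1 else 0) = if (a || b) then 1 else 0 := by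
  cases a <;> cases b <;> simp

lemma pvAInner_eq_any (wd : PySem.Dict Int (PySem.Set String)) (t : String) (l : Int) (is : List Int) :
    pvAInner wd t l is
      = if is.any (fun i => PySem.Set.contains (wd.getD l PySem.Set.empty)
          (pvToSig (PySem.Str.slice t none (some i) ++ PySem.Str.slice t (some (i + 1)) none)))
        then 1 else 0 := by
  induction is with
  | nil => simp [pvAInner]
  | cons i rest ih =>
    show (if _ then _ else pvAInner wd t l rest) = _
    rw [ih, List.any_cons, pvIf_bool]

-- Set.contains as membership
lemma pvContains_iff {s : PySem.Set String} {x : String} :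
    PySem.Set.contains s x = true ↔ x ∈ s := by
  simp [PySem.Set.contains]

-- the candidate A builds at index i is t with position i removed
lemma pvTmp_toList (t : String) (i : Int) (hi : 0 ≤ i) :
    (PySem.Str.slice t none (some i) ++ PySem.Str.slice t (some (i + 1)) none).toList
      = t.toList.eraseIdx i.toNat := by
  rw [String.toList_append, PySem.Str.toList_slice, PySem.Str.toList_slice]
  show PySem.List.slice t.toList none (some i) ++ PySem.List.slice t.toList (some (i + 1)) none
      = t.toList.eraseIdx i.toNat
  have h1 : (i + 1).toNat = i.toNat + 1 := by omega
  rw [PySem.List.slice_to _ hi, PySem.List.slice_from _ (by omega : (0:Int) ≤ i + 1), h1,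
    List.eraseIdx_eq_take_drop_succ]

-- the common existence condition both hit tests decide
def pvHit (S : List String) (tl : List Char) : Prop :=
  ∃ k, ∃ _ : k < tl.length, ∃ w ∈ S, pvToSig w
    = String.ofList (PySem.List.sorted (tl.eraseIdx k) (fun c => c) false)

-- A's any-test holds iff pvHit
lemma pvA_any_iff (S : List String) (t : String) :
    ((PySem.List.pyRange 0 (PySem.Str.len t) 1).any (fun i =>
        PySem.Set.contains ((pvBuildWd S).getD (PySem.Str.len t - 1) PySem.Set.empty)
          (pvToSig (PySem.Str.slice t none (some i) ++ PySem.Str.slice t (some (i + 1)) none))) = true)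
    ↔ pvHit S t.toList := by
  rw [List.any_eq_true]
  constructor
  · rintro ⟨i, hi, hc⟩
    obtain ⟨hi0, hin⟩ := PySem.List.mem_pyRange_one.mp hi
    rw [PySem.Str.len_eq] at hin
    have hk : i.toNat < t.toList.length := by omega
    rw [pvContains_iff, pvMem_buildWd] at hc
    obtain ⟨w, hw, _, hsig⟩ := hc
    refine ⟨i.toNat, hk, w, hw, ?_⟩
    rw [hsig]
    show pvToSig _ = _
    unfold pvToSig
    rw [pvTmp_toList t i hi0]
  · rintro ⟨k, hk, w, hw, hsig⟩
    refine ⟨(k : Int), PySem.List.mem_pyRange_one.mpr ⟨by omega, by rw [PySem.Str.len_eq]; omega⟩, ?_⟩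
    rw [pvContains_iff, pvMem_buildWd]
    refine ⟨w, hw, ?_, ?_⟩
    · -- length of w = length of t - 1, forced by the signature equality
      have h1 : (pvToSig w).toList.length = w.toList.length := by
        simp only [pvToSig, String.toList_ofList, PySem.List.length_sorted]
      have h2 : (String.ofList (PySem.List.sorted (t.toList.eraseIdx k) (fun c => c) false)).toList.length
          = t.toList.length - 1 := by
        simp only [String.toList_ofList, PySem.List.length_sorted, List.length_eraseIdx_of_lt hk]
      rw [hsig, h2] at h1
      rw [PySem.Str.len_eq, PySem.Str.len_eq]
      omega
    · rw [hsig]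
      unfold pvToSig
      rw [pvTmp_toList t (k : Int) (by omega)]
      rw [Int.toNat_natCast]

-- membership in B's reachable set, unfolded to an existence statement
lemma pvMem_reachable (S : List String) (al : PySem.Set Char) (x : String) :
    x ∈ pvReachable S al ↔ ∃ s ∈ S, ∃ c ∈ al, x = String.ofList (pvSig (s.toList ++ [c])) := by
  unfold pvReachable
  rw [PySem.Set.mem_ofList, List.mem_flatMap]
  constructor
  · rintro ⟨s, hs, hx⟩
    obtain ⟨c, hc, hcx⟩ := List.mem_map.mp hx
    exact ⟨s, hs, c, hc, hcx.symm⟩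
  · rintro ⟨s, hs, c, hc, hx⟩
    exact ⟨s, hs, List.mem_map.mpr ⟨c, hc, hx.symm⟩⟩

-- B's lookup holds iff pvHit (for a target t drawn from targetWords)
lemma pvB_contains_iff (S : List String) (T : List String) (t : String) (ht : t ∈ T) :
    (PySem.Set.contains (pvReachable S (pvAlphabet T)) (String.ofList (pvSig t.toList)) = true)
    ↔ pvHit S t.toList := by
  rw [pvContains_iff, pvMem_reachable]
  constructor
  · rintro ⟨s, hs, c, _, hx⟩
    -- sig t = sig (s ++ [c]) ⇒ t ~ s ++ [c]; c occurs in t at some index k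
    have hlist : pvSig t.toList = pvSig (s.toList ++ [c]) := by
      have := congrArg String.toList hx
      simpa [String.toList_ofList] using this
    have hperm : t.toList.Perm (s.toList ++ [c]) := by
      unfold pvSig at hlist
      have p1 := (PySem.List.sorted_perm t.toList (fun c => c) false).symm
      rw [hlist] at p1
      exact p1.trans (PySem.List.sorted_perm _ _ false)
    have hct : c ∈ t.toList := hperm.mem_iff.mpr (by simp)
    obtain ⟨k, hk, hck⟩ := List.mem_iff_getElem.mp hct
    refine ⟨k, hk, s, hs, ?_⟩
    have hperm2 : (t.toList.eraseIdx k).Perm s.toList := by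
      have h1 := pvPerm_cons_eraseIdx t.toList k hk
      have h2 : t.toList.Perm (c :: s.toList) :=
        hperm.trans (List.perm_append_singleton c s.toList)
      rw [hck] at h1
      exact (h1.symm.trans h2).cons_inv
    show String.ofList (pvSig s.toList) = String.ofList (pvSig (t.toList.eraseIdx k))
    rw [pvSig_eq_of_perm hperm2.symm]
  · rintro ⟨k, hk, w, hw, hsig⟩
    -- take s = w, c = t[k]: w ++ [t[k]] is a permutation of t
    refine ⟨w, hw, t.toList[k], ?_, ?_⟩
    · unfold pvAlphabet
      rw [PySem.Set.mem_ofList, List.mem_flatMap]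
      exact ⟨t, ht, List.getElem_mem hk⟩
    · have hlist : pvSig w.toList = pvSig (t.toList.eraseIdx k) := by
        have := congrArg String.toList hsig
        simpa [pvToSig, String.toList_ofList] using this
      have hperm : (w.toList ++ [t.toList[k]]).Perm t.toList := by
        have h1 : w.toList.Perm (t.toList.eraseIdx k) := by
          unfold pvSig at hlist
          have p1 := (PySem.List.sorted_perm w.toList (fun c => c) false).symm
          rw [hlist] at p1
          exact p1.trans (PySem.List.sorted_perm _ _ false)
        exact ((h1.append_right [t.toList[k]]).trans
          (List.perm_append_singleton _ _)).trans (pvPerm_cons_eraseIdx t.toList k hk).symm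
      have : pvSig (w.toList ++ [t.toList[k]]) = pvSig t.toList := pvSig_eq_of_perm hperm
      rw [this]

-- per-target equality of A's deletion loop and B's single lookup
lemma pvPerTarget (S : List String) (T : List String) (t : String) (ht : t ∈ T) :
    pvAInner (pvBuildWd S) t (PySem.Str.len t - 1) (PySem.List.pyRange 0 (PySem.Str.len t) 1)
      = (if PySem.Set.contains (pvReachable S (pvAlphabet T))
            (String.ofList (pvSig t.toList)) then 1 else 0) := by
  rw [pvAInner_eq_any]
  by_cases h : pvHit S t.toList
  · rw [if_pos ((pvA_any_iff S t).mpr h), if_pos ((pvB_contains_iff S T t ht).mpr h)]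
  · rw [if_neg (fun hc => h ((pvA_any_iff S t).mp hc)),
      if_neg (fun hc => h ((pvB_contains_iff S T t ht).mp hc))]

-- ===== VERDICT (by name: the statement is the Claim_ definition above) =====
theorem wordCount_spec : Claim_equal_wordCount := by
  intro S T _
  unfold Spec_wordCount wordCount wordCount_alt
  apply PySem.List.foldl_congr_mem
  intro acc t ht
  rw [pvPerTarget S T t ht]
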